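-- pv_equiv track=rewrite | github.com/horinsoftwaregroup/gando | src/gando/utils/strings/converters/__casings.py | p2k
-- ===== SOURCE A (Python) =====
-- def p2k(value: str):
--     value, start_underscores = get_all_start_underscores(value)
--     value, end_underscores = get_all_end_underscores(value)
--
--     tmp = value[0].lower()
--
--     for c in value[1:]:
--         tmp += f'-{c.lower()}' if c.isupper() else c
--
--     value = start_underscores + tmp + end_underscores
--     return value
--
-- def get_all_start_underscores(value):
--     i = 0
--     start_underscores = ''
--     while value[i] == '_':
--         start_underscores += '_'
--         i += 1
--     return value[i:], start_underscores
--
-- def get_all_end_underscores(value):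
--     i = -1
--     end_underscores = ''
--     while value[i] == '_':
--         end_underscores += '_'
--         i -= 1
--     return value[:len(value) + i + 1], end_underscores
-- ===== SOURCE B (Python) =====
-- def p2k(value: str):
--     # Single pass: copy underscores, lowercase the first non-underscore
--     # character, hyphenate-and-lower every later uppercase, keep the rest.
--     out = []
--     seen = False
--     for c in value:
--         if c == '_':
--             out.append(c)
--         elif not seen:
--             out.append(c.lower())
--             seen = True
--         elif c.isupper():
--             out.append('-' + c.lower())
--         else:
--             out.append(c)
--     return ''.join(out)
-- ===== Notes on version B (the rewrite author's own statement) =====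
-- stated objective: simpler
-- what changed: Replaces A's three phases (two index-based while-loops stripping leading/trailing underscores plus a rebuild loop over the core) by one single pass over the string with a flag marking the first core character, joined at the end.
import Mathlib
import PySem

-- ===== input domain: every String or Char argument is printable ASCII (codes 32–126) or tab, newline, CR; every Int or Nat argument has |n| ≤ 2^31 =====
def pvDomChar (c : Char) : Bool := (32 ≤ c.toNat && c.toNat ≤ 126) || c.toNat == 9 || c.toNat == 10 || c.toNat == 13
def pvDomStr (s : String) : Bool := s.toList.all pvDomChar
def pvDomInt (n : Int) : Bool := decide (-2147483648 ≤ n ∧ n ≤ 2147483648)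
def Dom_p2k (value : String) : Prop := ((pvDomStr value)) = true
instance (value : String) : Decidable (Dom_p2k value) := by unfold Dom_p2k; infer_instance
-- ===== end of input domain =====

-- B replaces A's three phases (two underscore-stripping while-loops plus a char-append rebuild loop)
-- by one single pass over the string with a flag marking the first core character; equal wherever A returns.


-- ===== PORT A =====
-- get_all_start_underscores: while value[i] == '_': i += 1.  An out-of-range value[i] is an
-- IndexError in Python (excluded by Pre_); that branch returns the loop's current state.
def gasuLoop (value : List Char) (i : Nat) (acc : List Char) : List Char × List Char :=
  if h : i < value.length then
    if value[i] = '_' then gasuLoop value (i + 1) (acc ++ ['_'])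
    else (value.drop i, acc)
  else (value.drop i, acc)
termination_by value.length - i

-- get_all_end_underscores: i starts at -1 and decreases; negative indexing via pyGet?.
-- Python has no fuel; fuel = len + 1 suffices on every input where Python's loop terminates,
-- and pyGet? = none (Python's IndexError, excluded by Pre_) also stops the recursion.
def gaeuLoop (value : List Char) (i : Int) (acc : List Char) (fuel : Nat) : List Char × List Char :=
  match fuel with
  | 0 => (PySem.List.slice value none (some ((value.length : Int) + i + 1)), acc)
  | fuel + 1 =>
    match PySem.List.pyGet? value i with
    | some c =>
        if c = '_' then gaeuLoop value (i - 1) (acc ++ ['_']) fuel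
        else (PySem.List.slice value none (some ((value.length : Int) + i + 1)), acc)
    | none => (PySem.List.slice value none (some ((value.length : Int) + i + 1)), acc)

def p2k (value : String) : String :=
  let p1 := gasuLoop value.toList 0 []
  let p2 := gaeuLoop p1.1 (-1) [] (p1.1.length + 1)
  match p2.1 with
  | [] => ""  -- Python: value[0] raises IndexError here (excluded by Pre_)
  | c0 :: rest =>
    let tmp := rest.foldl
      (fun t c => t ++ (if PySem.Chars.isupper c then ['-', PySem.Chars.lowerChar c] else [c]))
      [PySem.Chars.lowerChar c0]
    String.ofList (p1.2 ++ tmp ++ p2.2)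

-- ===== PORT B =====
def p2k_alt (value : String) : String :=
  let r := value.toList.foldl
    (fun (st : List Char × Bool) c =>
      if c = '_' then (st.1 ++ [c], st.2)
      else if !st.2 then (st.1 ++ [PySem.Chars.lowerChar c], true)
      else if PySem.Chars.isupper c then (st.1 ++ ['-', PySem.Chars.lowerChar c], st.2)
      else (st.1 ++ [c], st.2))
    ([], false)
  String.ofList r.1

-- ===== PRECONDITION & SPEC =====
-- A raises IndexError exactly when the string is empty or consists solely of underscores
-- (its underscore-stripping loops run off the string); Pre_ excludes exactly those inputs.
def Pre_p2k (value : String) : Prop := value.toList.any (· != '_') = true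
instance (value : String) : Decidable (Pre_p2k value) := by unfold Pre_p2k; infer_instance

def pvWitness_p2k : String := "_FooBar_"


def Spec_p2k (value : String) (out : String) : Prop := out = p2k_alt value
instance (value : String) (out : String) : Decidable (Spec_p2k value out) := by unfold Spec_p2k; infer_instance

-- ===== CLAIM (what is proved, stated in full; the proofs are below) =====
def Claim_equal_p2k : Prop := ∀ (value : String), Dom_p2k value → Pre_p2k value → Spec_p2k value (p2k value)

-- ===== LEMMAS AND PROOFS =====

-- the per-character kebab expansion both programs effectively apply after the first core char
def keb (c : Char) : List Char :=
  if PySem.Chars.isupper c then ['-', PySem.Chars.lowerChar c] else [c]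

lemma flatMap_keb_replicate (t : Nat) :
    (List.replicate t '_').flatMap keb = List.replicate t '_' := by
  induction t with
  | zero => rfl
  | succ n ih =>
    simp [List.replicate_succ, ih, keb, show PySem.Chars.isupper '_' = false from by decide]

lemma gasuLoop_spec (value : List Char) (i : Nat) (acc : List Char) :
    gasuLoop value i acc =
      ((value.drop i).dropWhile (· == '_'), acc ++ (value.drop i).takeWhile (· == '_')) := by
  fun_induction gasuLoop with
  | case1 i acc h heq ih =>
      rw [ih, List.drop_eq_getElem_cons h, List.dropWhile_cons, List.takeWhile_cons]
      simp [heq]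
  | case2 i acc h heq =>
      rw [List.drop_eq_getElem_cons h, List.dropWhile_cons, List.takeWhile_cons]
      simp [heq]
  | case3 i acc h =>
      have hd : value.drop i = [] := List.drop_eq_nil_of_le (by omega)
      simp [hd]

lemma gaeuLoop_spec (pre : List Char) (cl : Char) (t j : Nat) (acc : List Char) (fuel : Nat)
    (hcl : cl ≠ '_') (hj : j ≤ t) (hfuel : t - j < fuel) :
    gaeuLoop (pre ++ cl :: List.replicate t '_') (-(1 + (j : Int))) acc fuel =
      (pre ++ [cl], acc ++ List.replicate (t - j) '_') := by
  induction fuel generalizing j acc with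
  | zero => omega
  | succ fuel ih =>
    set L := pre ++ cl :: List.replicate t '_' with hL
    have hlen : L.length = pre.length + 1 + t := by simp [hL]; omega
    have hk : -(1 + (j : Int)) = -((1 + j : Nat) : Int) := by push_cast; ring
    have hget : PySem.List.pyGet? L (-(1 + (j : Int))) = L[L.length - (1 + j)]? := by
      rw [hk, PySem.List.pyGet?_neg_natCast L (1 + j) (by omega) (by omega)]
    rcases eq_or_lt_of_le hj with hjt | hjt
    · -- j = t : the loop hits the last non-underscore character and stops
      subst hjt
      have hcl' : L[L.length - (1 + j)]? = some cl := by
        rw [hlen]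
        have : pre.length + 1 + j - (1 + j) = pre.length := by omega
        rw [this, hL]
        simp
      rw [gaeuLoop]
      simp only [hget, hcl', if_neg hcl]
      have hb : (L.length : Int) + (-(1 + (j:Int))) + 1 = ((pre.length + 1 : Nat) : Int) := by
        rw [hlen]; push_cast; ring
      rw [hb, PySem.List.slice_to_natCast]
      have : L.take (pre.length + 1) = pre ++ [cl] := by
        rw [hL]
        simp [List.take_append]
      rw [this]
      simp
    · -- j < t : the loop reads '_' and recurses
      have hgetu : L[L.length - (1 + j)]? = some '_' := by
        rw [hlen, hL]
        have h1 : pre.length + 1 + t - (1 + j) = (pre ++ [cl]).length + (t - j - 1) := by simp; omega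
        rw [h1, show pre ++ cl :: List.replicate t '_' = (pre ++ [cl]) ++ List.replicate t '_' by simp]
        rw [List.getElem?_append_right (by omega)]
        simp [List.getElem?_replicate]
        omega
      rw [gaeuLoop]
      simp only [hget, hgetu, if_true]
      have harg : -(1 + (j : Int)) - 1 = -(1 + ((j + 1 : Nat) : Int)) := by push_cast; ring
      rw [harg, ih (j + 1) (acc ++ ['_']) (by omega) (by omega)]
      have : acc ++ ['_'] ++ List.replicate (t - (j + 1)) '_' = acc ++ List.replicate (t - j) '_' := by
        rw [List.append_assoc]
        congr 1
        rw [show t - j = (t - (j+1)) + 1 by omega, List.replicate_succ]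
        simp
      rw [this]

lemma foldlB_true (l out : List Char) :
    List.foldl
      (fun (st : List Char × Bool) c =>
        if c = '_' then (st.1 ++ [c], st.2)
        else if !st.2 then (st.1 ++ [PySem.Chars.lowerChar c], true)
        else if PySem.Chars.isupper c then (st.1 ++ ['-', PySem.Chars.lowerChar c], st.2)
        else (st.1 ++ [c], st.2))
      (out, true) l = (out ++ l.flatMap keb, true) := by
  induction l generalizing out with
  | nil => simp
  | cons c r ih =>
    rw [List.foldl_cons]
    by_cases hc : c = '_'
    · subst hc
      rw [if_pos rfl, ih]
      simp [keb, show PySem.Chars.isupper '_' = false from by decide]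
    · rw [if_neg hc, if_neg (by decide : ¬((!true) = true))]
      by_cases hu : PySem.Chars.isupper c
      · rw [if_pos hu, ih]
        simp [keb, hu]
      · rw [if_neg hu, ih]
        simp [keb, hu]

lemma foldlB_start (s : Nat) (c0 : Char) (r out : List Char) (hc0 : c0 ≠ '_') :
    List.foldl
      (fun (st : List Char × Bool) c =>
        if c = '_' then (st.1 ++ [c], st.2)
        else if !st.2 then (st.1 ++ [PySem.Chars.lowerChar c], true)
        else if PySem.Chars.isupper c then (st.1 ++ ['-', PySem.Chars.lowerChar c], st.2)
        else (st.1 ++ [c], st.2))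
      (out, false) (List.replicate s '_' ++ c0 :: r) =
      (out ++ List.replicate s '_' ++ PySem.Chars.lowerChar c0 :: r.flatMap keb, true) := by
  induction s generalizing out with
  | zero =>
    rw [List.replicate_zero, List.nil_append, List.foldl_cons,
      if_neg hc0, if_pos (by decide : (!false) = true), foldlB_true]
    simp
  | succ n ih =>
    rw [List.replicate_succ, List.cons_append, List.foldl_cons, if_pos rfl, ih]
    simp

lemma p2k_eq_of_decomp (value : String) (s t : Nat) (c0 : Char) (r' : List Char)
    (hc0 : c0 ≠ '_')
    (hl : value.toList = List.replicate s '_' ++ c0 :: (r' ++ List.replicate t '_'))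
    (pre : List Char) (cl : Char) (hpc : c0 :: r' = pre ++ [cl]) (hcl : cl ≠ '_') :
    p2k value = p2k_alt value := by
  have hA : p2k value = String.ofList (List.replicate s '_' ++
      (PySem.Chars.lowerChar c0 :: r'.flatMap keb) ++ List.replicate t '_') := by
    have hp1 : gasuLoop value.toList 0 [] = (c0 :: (r' ++ List.replicate t '_'), List.replicate s '_') := by
      rw [gasuLoop_spec]
      rw [hl]
      simp only [List.drop_zero, List.nil_append]
      have hdrep : List.dropWhile (fun x => x == '_') (List.replicate s '_') = [] := by
        rw [List.dropWhile_eq_nil_iff]; intro x hx; simp [List.eq_of_mem_replicate hx]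
      have htrep : List.takeWhile (fun x => x == '_') (List.replicate s '_') = List.replicate s '_' := by
        rw [List.takeWhile_eq_self_iff]; intro x hx; simp [List.eq_of_mem_replicate hx]
      rw [List.dropWhile_append, hdrep, List.takeWhile_append]
      simp [hc0, htrep]
    have hform : c0 :: (r' ++ List.replicate t '_') = pre ++ cl :: List.replicate t '_' := by
      rw [← List.cons_append, hpc]
      simp
    have hp2 : gaeuLoop (c0 :: (r' ++ List.replicate t '_')) (-1) []
        ((c0 :: (r' ++ List.replicate t '_')).length + 1) = (c0 :: r', List.replicate t '_') := by
      rw [hform]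
      rw [show (-1 : Int) = -(1 + ((0:Nat) : Int)) by norm_num]
      rw [gaeuLoop_spec pre cl t 0 [] _ hcl (by omega) (by simp; omega)]
      rw [← hpc]
      simp
    simp only [p2k]
    rw [hp1]
    simp only
    rw [hp2]
    simp only
    have hlam : (fun (t : List Char) c => t ++
        (if PySem.Chars.isupper c then ['-', PySem.Chars.lowerChar c] else [c])) =
        (fun (t : List Char) c => t ++ keb c) := rfl
    rw [hlam, PySem.List.foldl_append_eq_flatMap]
    simp
  have hB : p2k_alt value = String.ofList (List.replicate s '_' ++
      PySem.Chars.lowerChar c0 :: (r'.flatMap keb ++ List.replicate t '_')) := by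
    simp only [p2k_alt]
    rw [hl, foldlB_start s c0 _ [] hc0]
    simp only [List.nil_append]
    rw [List.flatMap_append, flatMap_keb_replicate]
  rw [hA, hB]
  congr 1
  simp


-- ===== VERDICT (by name: the statement is the Claim_ definition above) =====
theorem p2k_spec : Claim_equal_p2k := by
  intro value _ hpre
  unfold Spec_p2k
  unfold Pre_p2k at hpre
  have hdwne : value.toList.dropWhile (fun c => c == '_') ≠ [] := by
    intro h
    rw [List.dropWhile_eq_nil_iff] at h
    simp only [List.any_eq_true] at hpre
    obtain ⟨x, hx, hxne⟩ := hpre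
    have := h x hx
    simp at this hxne
    exact hxne this
  obtain ⟨c0, r, hcons⟩ : ∃ c0 r, value.toList.dropWhile (fun c => c == '_') = c0 :: r := by
    cases hdw : value.toList.dropWhile (fun c => c == '_') with
    | nil => exact absurd hdw hdwne
    | cons a b => exact ⟨a, b, rfl⟩
  have hc0 : c0 ≠ '_' := by
    have h := List.head_dropWhile_not (fun c => c == '_') hdwne
    simp only [hcons, List.head_cons] at h
    intro hx
    rw [hx] at h
    simp at h
  have htwrep : value.toList.takeWhile (fun c => c == '_') =
      List.replicate (value.toList.takeWhile (fun c => c == '_')).length '_' :=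
    List.eq_replicate_of_mem (by
      intro b hb
      have := List.mem_takeWhile_imp hb
      simpa using this)
  have hwtrep : r.reverse.takeWhile (fun c => c == '_') =
      List.replicate (r.reverse.takeWhile (fun c => c == '_')).length '_' :=
    List.eq_replicate_of_mem (by
      intro b hb
      have := List.mem_takeWhile_imp hb
      simpa using this)
  have hr : r = (r.reverse.dropWhile (fun c => c == '_')).reverse ++
      List.replicate (r.reverse.takeWhile (fun c => c == '_')).length '_' := by
    conv_lhs => rw [← List.reverse_reverse r,
      ← List.takeWhile_append_dropWhile (p := fun c => c == '_') (l := r.reverse)]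
    rw [List.reverse_append]
    congr 1
    rw [hwtrep, List.reverse_replicate]
    simp
  have hl : value.toList =
      List.replicate (value.toList.takeWhile (fun c => c == '_')).length '_' ++
      c0 :: ((r.reverse.dropWhile (fun c => c == '_')).reverse ++
        List.replicate (r.reverse.takeWhile (fun c => c == '_')).length '_') := by
    conv_lhs => rw [← List.takeWhile_append_dropWhile (p := fun c => c == '_') (l := value.toList)]
    rw [hcons, ← hr, htwrep]
    simp
  obtain ⟨pre, cl, hpc, hcl⟩ : ∃ pre cl,
      c0 :: (r.reverse.dropWhile (fun c => c == '_')).reverse = pre ++ [cl] ∧ cl ≠ '_' := by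
    cases hwd : r.reverse.dropWhile (fun c => c == '_') with
    | nil => exact ⟨[], c0, by simp, hc0⟩
    | cons d0 ds =>
      have hwdne : r.reverse.dropWhile (fun c => c == '_') ≠ [] := by simp [hwd]
      have h := List.head_dropWhile_not (fun c => c == '_') hwdne
      simp only [hwd, List.head_cons] at h
      refine ⟨c0 :: ds.reverse, d0, by simp, ?_⟩
      intro hx
      rw [hx] at h
      simp at h
  exact p2k_eq_of_decomp value _ _ c0 _ hc0 hl pre cl hpc hcl
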